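-- pv_equiv track=rewrite | github.com/wxWidgets/Phoenix | buildtools/config.py | adjustLFLAGS
-- ===== SOURCE A (Python) =====
-- def adjustLFLAGS(lflags, libdirs, libs):
--     """
--     Extract the -L and -l flags from lflags and put them in libdirs and
--     libs as needed
--     """
--     newLFLAGS = []
--     for flag in lflags:
--         if flag[:2] == '-L':
--             libdirs.append(flag[2:])
--         elif flag[:2] == '-l':
--             libs.append(flag[2:])
--         else:
--             newLFLAGS.append(flag)
--     return newLFLAGS
-- ===== SOURCE B (Python) =====
-- def adjustLFLAGS(lflags, libdirs, libs):
--     """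
--     Extract the -L and -l flags from lflags and put them in libdirs and
--     libs as needed
--     """
--     libdirs.extend(f[2:] for f in lflags if f[:2] == '-L')
--     libs.extend(f[2:] for f in lflags if f[:2] == '-l')
--     return [f for f in lflags if f[:2] not in ('-L', '-l')]
-- ===== Notes on version B (the rewrite author's own statement) =====
-- stated objective: simpler
-- what changed: The single fused loop that maintains three running buckets is replaced by three independent passes over lflags: two filtered extends for libdirs/libs and a list comprehension for the returned flags.
import Mathlib
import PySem

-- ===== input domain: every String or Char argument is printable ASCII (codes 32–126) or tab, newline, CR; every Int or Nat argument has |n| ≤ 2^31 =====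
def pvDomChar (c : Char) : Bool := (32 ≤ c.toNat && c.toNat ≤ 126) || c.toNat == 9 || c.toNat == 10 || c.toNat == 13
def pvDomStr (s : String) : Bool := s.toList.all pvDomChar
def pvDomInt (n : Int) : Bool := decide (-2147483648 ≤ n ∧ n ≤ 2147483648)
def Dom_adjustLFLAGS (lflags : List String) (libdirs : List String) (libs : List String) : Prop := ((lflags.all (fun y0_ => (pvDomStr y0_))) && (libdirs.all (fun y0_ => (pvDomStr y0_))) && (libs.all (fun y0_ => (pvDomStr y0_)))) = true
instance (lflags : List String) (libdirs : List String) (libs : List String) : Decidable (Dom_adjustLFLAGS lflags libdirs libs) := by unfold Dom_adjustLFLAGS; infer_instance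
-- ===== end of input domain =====

-- B replaces A's single fused loop by three independent filtered passes (simpler);
-- A mutates libdirs/libs in place (B performs the same mutations); the equivalence
-- proved here is about the RETURN value only.

-- f[:2] and f[2:] on a Python str: exact nonnegative slices, take/drop on the char list.
def pvTake2 (s : String) : String := String.ofList (s.toList.take 2)
def pvDrop2 (s : String) : String := String.ofList (s.toList.drop 2)

-- ===== PORT A =====
-- one pass; state = (newLFLAGS, libdirs, libs), branches in A's order
def adjustLFLAGS (lflags : List String) (libdirs : List String) (libs : List String) : List String :=
  (lflags.foldl
    (fun (st : List String × List String × List String) flag =>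
      if pvTake2 flag = "-L" then (st.1, st.2.1 ++ [pvDrop2 flag], st.2.2)
      else if pvTake2 flag = "-l" then (st.1, st.2.1, st.2.2 ++ [pvDrop2 flag])
      else (st.1 ++ [flag], st.2.1, st.2.2))
    ([], libdirs, libs)).1

-- ===== PORT B =====
-- three independent passes; the first two only feed the (unreturned) mutations
def adjustLFLAGS_alt (lflags : List String) (libdirs : List String) (libs : List String) : List String :=
  let _libdirs := libdirs ++ (lflags.filter (fun f => pvTake2 f = "-L")).map pvDrop2
  let _libs := libs ++ (lflags.filter (fun f => pvTake2 f = "-l")).map pvDrop2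
  lflags.filter (fun f => ¬ (pvTake2 f = "-L" ∨ pvTake2 f = "-l"))

-- ===== PRECONDITION & SPEC =====
def Spec_adjustLFLAGS (lflags : List String) (libdirs : List String) (libs : List String) (out : List String) : Prop := out = adjustLFLAGS_alt lflags libdirs libs
instance (lflags : List String) (libdirs : List String) (libs : List String) (out : List String) : Decidable (Spec_adjustLFLAGS lflags libdirs libs out) := by unfold Spec_adjustLFLAGS; infer_instance

-- ===== CLAIM (what is proved, stated in full; the proofs are below) =====
def Claim_equal_adjustLFLAGS : Prop := ∀ (lflags : List String) (libdirs : List String) (libs : List String), Dom_adjustLFLAGS lflags libdirs libs → Spec_adjustLFLAGS lflags libdirs libs (adjustLFLAGS lflags libdirs libs)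

-- ===== LEMMAS AND PROOFS =====

-- the first component of A's fold is the accumulator followed by B's filter
theorem adjustLFLAGS_fold_fst (lflags nl ld ls : List String) :
    (lflags.foldl
      (fun (st : List String × List String × List String) flag =>
        if pvTake2 flag = "-L" then (st.1, st.2.1 ++ [pvDrop2 flag], st.2.2)
        else if pvTake2 flag = "-l" then (st.1, st.2.1, st.2.2 ++ [pvDrop2 flag])
        else (st.1 ++ [flag], st.2.1, st.2.2))
      (nl, ld, ls)).1
    = nl ++ lflags.filter (fun f => ¬ (pvTake2 f = "-L" ∨ pvTake2 f = "-l")) := by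
  induction lflags generalizing nl ld ls with
  | nil => simp
  | cons f rest ih =>
    by_cases hL : pvTake2 f = "-L"
    · simp [List.foldl, hL, ih]
    · by_cases hl : pvTake2 f = "-l"
      · simp [List.foldl, hl, ih]
      · simp [List.foldl, hL, hl, ih]

-- ===== VERDICT (by name: the statement is the Claim_ definition above) =====
theorem adjustLFLAGS_spec : Claim_equal_adjustLFLAGS := by
  intro lflags libdirs libs _
  unfold Spec_adjustLFLAGS adjustLFLAGS adjustLFLAGS_alt
  simpa using adjustLFLAGS_fold_fst lflags [] libdirs libs
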